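-- pv_equiv track=rewrite | github.com/akmedat01/a-maze-ing-1337 | visualizing_maze.py | _path_grid_coords
-- ===== SOURCE A (Python) =====
-- from typing import Any, Dict, List, Optional, Tuple
--
-- Coord = Tuple[int, int]
--
-- def _path_grid_coords(entry: Coord, path: str) -> set:
--     """Return corner-grid coords of the full solution path.
--
--     Includes both cell centers and the wall-segment coords
--     between consecutive cells so the path draws as a solid
--     continuous line through the corridors.
--
--     Args:
--         entry: Starting maze cell (row, col).
--         path: Direction string from _solve.
--
--     Returns:
--         Set of (grid_row, grid_col) coordinates.
--     """
--     r, c = entry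
--     coords: set = {(r * 2 + 1, c * 2 + 1)}
--     for d in path:
--         if d == "N":
--             coords.add((r * 2, c * 2 + 1))
--             r -= 1
--         elif d == "S":
--             coords.add((r * 2 + 2, c * 2 + 1))
--             r += 1
--         elif d == "E":
--             coords.add((r * 2 + 1, c * 2 + 2))
--             c += 1
--         elif d == "W":
--             coords.add((r * 2 + 1, c * 2))
--             c -= 1
--         coords.add((r * 2 + 1, c * 2 + 1))
--     return coords
-- ===== SOURCE B (Python) =====
-- def _path_grid_coords(entry, path):
--     """Two-pass rebuild: materialize the list of cell-center grid coords by
--     prefix-accumulating per-direction grid deltas, then interleave each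
--     consecutive pair's integer midpoint (the wall coord) and dedup into a set."""
--     delta = {"N": (-2, 0), "S": (2, 0), "E": (0, 2), "W": (0, -2)}
--     start = (entry[0] * 2 + 1, entry[1] * 2 + 1)
--     centers = [start]
--     cur = start
--     for d in path:
--         dr, dc = delta.get(d, (0, 0))
--         cur = (cur[0] + dr, cur[1] + dc)
--         centers.append(cur)
--     seq = [start]
--     for p, q in zip(centers, centers[1:]):
--         seq.append(((p[0] + q[0]) // 2, (p[1] + q[1]) // 2))
--         seq.append(q)
--     return set(seq)
-- ===== Notes on version B (the rewrite author's own statement) =====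
-- stated objective: alternative
-- what changed: B replaces A's fused stateful scan (tracking (r,c) and adding wall+center per step) with two materialized passes: first prefix-accumulate per-direction grid deltas into the list of cell-center coords, then a separate pass over consecutive center pairs that inserts each pair's integer midpoint (the wall coord) before deduplicating into a set.
import Mathlib
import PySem

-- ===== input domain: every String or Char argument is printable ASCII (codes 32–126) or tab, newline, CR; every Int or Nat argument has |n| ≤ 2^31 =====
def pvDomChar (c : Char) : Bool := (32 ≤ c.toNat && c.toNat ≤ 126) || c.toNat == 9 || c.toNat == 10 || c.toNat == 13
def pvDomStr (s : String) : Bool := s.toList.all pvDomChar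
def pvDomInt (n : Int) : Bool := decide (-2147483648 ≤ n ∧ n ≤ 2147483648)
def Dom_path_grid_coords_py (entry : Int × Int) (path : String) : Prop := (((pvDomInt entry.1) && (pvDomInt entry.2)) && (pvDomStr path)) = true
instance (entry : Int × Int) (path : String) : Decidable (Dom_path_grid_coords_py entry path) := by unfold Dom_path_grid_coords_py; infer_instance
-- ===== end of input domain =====

-- B rebuilds the set in two materialized passes (cell-center list by prefix accumulation, then pairwise integer midpoints) instead of A's fused stateful scan; objective: alternative decomposition, same cost.

-- ===== PORT A =====
-- the body of A's 'for d in path' loop (state: r, c, coords)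
def pgcAStep (st : Int × Int × PySem.Set (Int × Int)) (d : Char) : Int × Int × PySem.Set (Int × Int) :=
  let r := st.1
  let c := st.2.1
  let coords := st.2.2
  let st' : Int × Int × PySem.Set (Int × Int) :=
    if d = 'N' then (r - 1, c, PySem.Set.add coords (r * 2, c * 2 + 1))
    else if d = 'S' then (r + 1, c, PySem.Set.add coords (r * 2 + 2, c * 2 + 1))
    else if d = 'E' then (r, c + 1, PySem.Set.add coords (r * 2 + 1, c * 2 + 2))
    else if d = 'W' then (r, c - 1, PySem.Set.add coords (r * 2 + 1, c * 2))
    else (r, c, coords)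
  (st'.1, st'.2.1, PySem.Set.add st'.2.2 (st'.1 * 2 + 1, st'.2.1 * 2 + 1))

def path_grid_coords_py (entry : Int × Int) (path : String) : List (Int × Int) :=
  (path.toList.foldl pgcAStep
    (entry.1, entry.2, PySem.Set.add PySem.Set.empty (entry.1 * 2 + 1, entry.2 * 2 + 1))).2.2

-- ===== PORT B =====
def pgcDelta : PySem.Dict Char (Int × Int) :=
  PySem.Dict.ofList [('N', (-2, 0)), ('S', (2, 0)), ('E', (0, 2)), ('W', (0, -2))]

-- pass 1 loop body: extend the center list by the delta of direction d
def pgcBStep (st : List (Int × Int) × (Int × Int)) (d : Char) : List (Int × Int) × (Int × Int) :=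
  let dd := PySem.Dict.getD pgcDelta d (0, 0)
  let cur : Int × Int := (st.2.1 + dd.1, st.2.2 + dd.2)
  (st.1 ++ [cur], cur)

-- pass 2 loop body: append the pair's integer midpoint and its second element
def pgcMidStep (acc : List (Int × Int)) (pq : (Int × Int) × (Int × Int)) : List (Int × Int) :=
  acc ++ [(PySem.Int.floordiv (pq.1.1 + pq.2.1) 2, PySem.Int.floordiv (pq.1.2 + pq.2.2) 2), pq.2]

def path_grid_coords_py_alt (entry : Int × Int) (path : String) : List (Int × Int) :=
  let start : Int × Int := (entry.1 * 2 + 1, entry.2 * 2 + 1)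
  let centers := (path.toList.foldl pgcBStep ([start], start)).1
  let seq := (centers.zip centers.tail).foldl pgcMidStep [start]
  PySem.Set.ofList seq

-- ===== PRECONDITION & SPEC =====
def Spec_path_grid_coords_py (entry : Int × Int) (path : String) (out : List (Int × Int)) : Prop := out = path_grid_coords_py_alt entry path
instance (entry : Int × Int) (path : String) (out : List (Int × Int)) : Decidable (Spec_path_grid_coords_py entry path out) := by unfold Spec_path_grid_coords_py; infer_instance

-- ===== CLAIM (what is proved, stated in full; the proofs are below) =====
def Claim_equal_path_grid_coords_py : Prop := ∀ (entry : Int × Int) (path : String), Dom_path_grid_coords_py entry path → Spec_path_grid_coords_py entry path (path_grid_coords_py entry path)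

-- ===== LEMMAS AND PROOFS =====

def pgNext (p : Int × Int) (d : Char) : Int × Int :=
  (p.1 + (PySem.Dict.getD pgcDelta d (0, 0)).1, p.2 + (PySem.Dict.getD pgcDelta d (0, 0)).2)

def pgTrail (p : Int × Int) : List Char → List (Int × Int)
  | [] => []
  | d :: ds => pgNext p d :: pgTrail (pgNext p d) ds

def pgEnd (p : Int × Int) : List Char → (Int × Int)
  | [] => p
  | d :: ds => pgEnd (pgNext p d) ds

def pgInter (p : Int × Int) : List Char → List (Int × Int)
  | [] => []
  | d :: ds =>
    (PySem.Int.floordiv (p.1 + (pgNext p d).1) 2, PySem.Int.floordiv (p.2 + (pgNext p d).2) 2)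
      :: pgNext p d :: pgInter (pgNext p d) ds

theorem pgcDelta_other {d : Char} (hN : d ≠ 'N') (hS : d ≠ 'S') (hE : d ≠ 'E') (hW : d ≠ 'W') :
    PySem.Dict.getD pgcDelta d (0, 0) = (0, 0) := by
  apply PySem.Dict.getD_of_not_contains
  rw [PySem.Dict.contains_eq_decide_mem_keys, show pgcDelta.keys = ['N','S','E','W'] from by decide]
  simp [hN, hS, hE, hW]

theorem pg_centers (ds : List Char) : ∀ (p : Int × Int) (acc : List (Int × Int)),
    ds.foldl pgcBStep (acc, p) = (acc ++ pgTrail p ds, pgEnd p ds) := by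
  induction ds with
  | nil => intro p acc; simp [pgTrail, pgEnd]
  | cons d ds ih =>
    intro p acc
    have hstep : pgcBStep (acc, p) d = (acc ++ [pgNext p d], pgNext p d) := rfl
    rw [List.foldl_cons, hstep, ih (pgNext p d) (acc ++ [pgNext p d])]
    simp [pgTrail, pgEnd]

theorem pg_seq (ds : List Char) : ∀ (p : Int × Int) (acc : List (Int × Int)),
    ((p :: pgTrail p ds).zip (pgTrail p ds)).foldl pgcMidStep acc = acc ++ pgInter p ds := by
  induction ds with
  | nil => intro p acc; simp [pgTrail, pgInter]
  | cons d ds ih =>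
    intro p acc
    simp only [pgTrail, pgInter, List.zip_cons_cons, List.foldl_cons]
    rw [ih (pgNext p d)]
    simp [pgcMidStep]

theorem pg_add_idem {s : PySem.Set (Int × Int)} {x : Int × Int} :
    PySem.Set.add (PySem.Set.add s x) x = PySem.Set.add s x :=
  PySem.Set.add_of_mem ((PySem.Set.mem_add _ _ _).mpr (Or.inr rfl))

theorem pg_a_loop (ds : List Char) : ∀ (r c : Int) (s : PySem.Set (Int × Int)),
    (ds.foldl pgcAStep (r, c, s)).2.2
    = (pgInter (r * 2 + 1, c * 2 + 1) ds).foldl PySem.Set.add s := by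
  induction ds with
  | nil => intro r c s; simp [pgInter]
  | cons d ds ih =>
    intro r c s
    rw [List.foldl_cons]
    by_cases hN : d = 'N'
    · subst hN
      have hn : pgNext (r * 2 + 1, c * 2 + 1) 'N' = ((r - 1) * 2 + 1, c * 2 + 1) := by
        simp only [pgNext, show PySem.Dict.getD pgcDelta 'N' (0,0) = (-2, 0) from by decide]
        norm_num; ring
      have hstep : pgcAStep (r, c, s) 'N'
          = (r - 1, c, PySem.Set.add (PySem.Set.add s (r * 2, c * 2 + 1)) ((r - 1) * 2 + 1, c * 2 + 1)) := by
        simp [pgcAStep]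
      have h1 : PySem.Int.floordiv (r * 2 + 1 + ((r - 1) * 2 + 1)) 2 = r * 2 := by
        rw [PySem.Int.floordiv_eq_ediv_of_pos (by norm_num)]; omega
      have h2 : PySem.Int.floordiv (c * 2 + 1 + (c * 2 + 1)) 2 = c * 2 + 1 := by
        rw [PySem.Int.floordiv_eq_ediv_of_pos (by norm_num)]; omega
      rw [hstep, ih (r - 1) c]
      simp only [pgInter, hn, h1, h2, List.foldl_cons]
    by_cases hS : d = 'S'
    · subst hS
      have hn : pgNext (r * 2 + 1, c * 2 + 1) 'S' = ((r + 1) * 2 + 1, c * 2 + 1) := by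
        simp only [pgNext, show PySem.Dict.getD pgcDelta 'S' (0,0) = (2, 0) from by decide]
        norm_num; ring
      have hstep : pgcAStep (r, c, s) 'S'
          = (r + 1, c, PySem.Set.add (PySem.Set.add s (r * 2 + 2, c * 2 + 1)) ((r + 1) * 2 + 1, c * 2 + 1)) := by
        simp [pgcAStep]
      have h1 : PySem.Int.floordiv (r * 2 + 1 + ((r + 1) * 2 + 1)) 2 = r * 2 + 2 := by
        rw [PySem.Int.floordiv_eq_ediv_of_pos (by norm_num)]; omega
      have h2 : PySem.Int.floordiv (c * 2 + 1 + (c * 2 + 1)) 2 = c * 2 + 1 := by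
        rw [PySem.Int.floordiv_eq_ediv_of_pos (by norm_num)]; omega
      rw [hstep, ih (r + 1) c]
      simp only [pgInter, hn, h1, h2, List.foldl_cons]
    by_cases hE : d = 'E'
    · subst hE
      have hn : pgNext (r * 2 + 1, c * 2 + 1) 'E' = (r * 2 + 1, (c + 1) * 2 + 1) := by
        simp only [pgNext, show PySem.Dict.getD pgcDelta 'E' (0,0) = (0, 2) from by decide]
        norm_num; ring
      have hstep : pgcAStep (r, c, s) 'E'
          = (r, c + 1, PySem.Set.add (PySem.Set.add s (r * 2 + 1, c * 2 + 2)) (r * 2 + 1, (c + 1) * 2 + 1)) := by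
        simp [pgcAStep]
      have h1 : PySem.Int.floordiv (r * 2 + 1 + (r * 2 + 1)) 2 = r * 2 + 1 := by
        rw [PySem.Int.floordiv_eq_ediv_of_pos (by norm_num)]; omega
      have h2 : PySem.Int.floordiv (c * 2 + 1 + ((c + 1) * 2 + 1)) 2 = c * 2 + 2 := by
        rw [PySem.Int.floordiv_eq_ediv_of_pos (by norm_num)]; omega
      rw [hstep, ih r (c + 1)]
      simp only [pgInter, hn, h1, h2, List.foldl_cons]
    by_cases hW : d = 'W'
    · subst hW
      have hn : pgNext (r * 2 + 1, c * 2 + 1) 'W' = (r * 2 + 1, (c - 1) * 2 + 1) := by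
        simp only [pgNext, show PySem.Dict.getD pgcDelta 'W' (0,0) = (0, -2) from by decide]
        norm_num; ring
      have hstep : pgcAStep (r, c, s) 'W'
          = (r, c - 1, PySem.Set.add (PySem.Set.add s (r * 2 + 1, c * 2)) (r * 2 + 1, (c - 1) * 2 + 1)) := by
        simp [pgcAStep]
      have h1 : PySem.Int.floordiv (r * 2 + 1 + (r * 2 + 1)) 2 = r * 2 + 1 := by
        rw [PySem.Int.floordiv_eq_ediv_of_pos (by norm_num)]; omega
      have h2 : PySem.Int.floordiv (c * 2 + 1 + ((c - 1) * 2 + 1)) 2 = c * 2 := by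
        rw [PySem.Int.floordiv_eq_ediv_of_pos (by norm_num)]; omega
      rw [hstep, ih r (c - 1)]
      simp only [pgInter, hn, h1, h2, List.foldl_cons]
    · -- any other character: zero delta, the midpoint is the (unmoved) center itself
      have hn : pgNext (r * 2 + 1, c * 2 + 1) d = (r * 2 + 1, c * 2 + 1) := by
        simp [pgNext, pgcDelta_other hN hS hE hW]
      have hstep : pgcAStep (r, c, s) d = (r, c, PySem.Set.add s (r * 2 + 1, c * 2 + 1)) := by
        simp [pgcAStep, hN, hS, hE, hW]
      have h1 : PySem.Int.floordiv (r * 2 + 1 + (r * 2 + 1)) 2 = r * 2 + 1 := by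
        rw [PySem.Int.floordiv_eq_ediv_of_pos (by norm_num)]; omega
      have h2 : PySem.Int.floordiv (c * 2 + 1 + (c * 2 + 1)) 2 = c * 2 + 1 := by
        rw [PySem.Int.floordiv_eq_ediv_of_pos (by norm_num)]; omega
      rw [hstep, ih r c]
      simp only [pgInter, hn, h1, h2, List.foldl_cons, pg_add_idem]

-- ===== VERDICT (by name: the statement is the Claim_ definition above) =====
theorem path_grid_coords_py_spec : Claim_equal_path_grid_coords_py := by
  intro entry path _
  unfold Spec_path_grid_coords_py path_grid_coords_py path_grid_coords_py_alt
  simp only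
  rw [pg_centers]
  have htail : ((entry.1 * 2 + 1, entry.2 * 2 + 1) :: pgTrail (entry.1 * 2 + 1, entry.2 * 2 + 1) path.toList).tail
      = pgTrail (entry.1 * 2 + 1, entry.2 * 2 + 1) path.toList := rfl
  simp only [List.singleton_append, htail]
  rw [pg_seq, pg_a_loop]
  rfl
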